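-- pv_equiv track=rewrite | github.com/MWATelescope/mwalib | tools/comparison_tools/create_comparison_csvs.py | get_baseline_from_antennas
-- ===== SOURCE A (Python) =====
-- def get_baseline_from_antennas(antenna1, antenna2, num_antennas):
--     baseline_index = 0
--     for ant1 in range(0,num_antennas):
--         for ant2 in range(ant1, num_antennas):
--             if ant1 == antenna1 and ant2 == antenna2:
--                 return baseline_index
--
--             baseline_index += 1
--
--     # Baseline was not found at all
--     return None
-- ===== SOURCE B (Python) =====
-- def get_baseline_from_antennas(antenna1, antenna2, num_antennas):
--     # Closed-form index into the upper-triangular (ant1 <= ant2) baseline enumeration.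
--     if 0 <= antenna1 <= antenna2 < num_antennas:
--         return antenna1 * num_antennas - antenna1 * (antenna1 - 1) // 2 + (antenna2 - antenna1)
--     return None
-- ===== Notes on version B (the rewrite author's own statement) =====
-- stated objective: faster
-- what changed: Replaced the nested scan over all antenna pairs by a closed-form arithmetic formula with a range/order validity check.
import Mathlib
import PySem

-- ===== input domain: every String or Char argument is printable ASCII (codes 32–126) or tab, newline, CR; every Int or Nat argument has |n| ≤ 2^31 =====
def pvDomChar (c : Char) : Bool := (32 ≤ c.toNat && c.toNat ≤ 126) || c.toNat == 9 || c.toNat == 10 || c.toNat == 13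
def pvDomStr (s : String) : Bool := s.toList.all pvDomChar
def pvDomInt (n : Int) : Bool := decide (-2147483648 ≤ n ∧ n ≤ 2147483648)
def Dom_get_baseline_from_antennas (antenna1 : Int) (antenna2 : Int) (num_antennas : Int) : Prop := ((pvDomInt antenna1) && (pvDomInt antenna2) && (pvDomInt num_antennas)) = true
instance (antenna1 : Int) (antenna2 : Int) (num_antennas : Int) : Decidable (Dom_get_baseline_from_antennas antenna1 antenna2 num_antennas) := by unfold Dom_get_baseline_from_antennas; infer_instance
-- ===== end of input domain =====

-- B replaces A's O(n^2) nested scan over antenna pairs by an O(1) closed-form index with a validity check.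


-- ===== PORT A =====
-- inner 'for ant2 in range(ant1, num_antennas)' loop: returns (some idx) on the early return,
-- otherwise (none, final baseline_index)
def pvInnerA (antenna1 antenna2 ant1 : Int) : List Int → Int → Option Int × Int
  | [], idx => (none, idx)
  | a2 :: rest, idx =>
    if ant1 = antenna1 ∧ a2 = antenna2 then (some idx, idx)
    else pvInnerA antenna1 antenna2 ant1 rest (idx + 1)

-- outer 'for ant1 in range(0, num_antennas)' loop
def pvOuterA (antenna1 antenna2 num_antennas : Int) : List Int → Int → Option Int
  | [], _ => none
  | a1 :: rest, idx =>
    match pvInnerA antenna1 antenna2 a1 (PySem.List.pyRange a1 num_antennas 1) idx with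
    | (some r, _) => some r
    | (none, idx') => pvOuterA antenna1 antenna2 num_antennas rest idx'

def get_baseline_from_antennas (antenna1 : Int) (antenna2 : Int) (num_antennas : Int) : Option Int :=
  pvOuterA antenna1 antenna2 num_antennas (PySem.List.pyRange 0 num_antennas 1) 0

-- ===== PORT B =====
def get_baseline_from_antennas_alt (antenna1 : Int) (antenna2 : Int) (num_antennas : Int) : Option Int :=
  if 0 ≤ antenna1 ∧ antenna1 ≤ antenna2 ∧ antenna2 < num_antennas then
    some (antenna1 * num_antennas - PySem.Int.floordiv (antenna1 * (antenna1 - 1)) 2 + (antenna2 - antenna1))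
  else none

-- ===== PRECONDITION & SPEC =====
def Spec_get_baseline_from_antennas (antenna1 : Int) (antenna2 : Int) (num_antennas : Int) (out : Option Int) : Prop := out = get_baseline_from_antennas_alt antenna1 antenna2 num_antennas
instance (antenna1 : Int) (antenna2 : Int) (num_antennas : Int) (out : Option Int) : Decidable (Spec_get_baseline_from_antennas antenna1 antenna2 num_antennas out) := by unfold Spec_get_baseline_from_antennas; infer_instance

-- ===== CLAIM (what is proved, stated in full; the proofs are below) =====
def Claim_equal_get_baseline_from_antennas : Prop := ∀ (antenna1 : Int) (antenna2 : Int) (num_antennas : Int), Dom_get_baseline_from_antennas antenna1 antenna2 num_antennas → Spec_get_baseline_from_antennas antenna1 antenna2 num_antennas (get_baseline_from_antennas antenna1 antenna2 num_antennas)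

-- ===== LEMMAS AND PROOFS =====

-- inner loop over range(s, n): finds antenna2 iff ant1 = antenna1 and s ≤ antenna2 < n;
-- otherwise falls through with idx advanced by the length of the range
theorem pvInnerA_spec (antenna1 antenna2 ant1 n : Int) :
    ∀ (k : ℕ) (s idx : Int), (n - s).toNat = k →
    pvInnerA antenna1 antenna2 ant1 (PySem.List.pyRange s n 1) idx =
      (if ant1 = antenna1 ∧ s ≤ antenna2 ∧ antenna2 < n then
         (some (idx + (antenna2 - s)), idx + (antenna2 - s))
       else (none, idx + max (n - s) 0)) := by
  intro k
  induction k with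
  | zero =>
    intro s idx hk
    have hns : n ≤ s := by omega
    rw [PySem.List.pyRange_one_eq_nil hns]
    simp only [pvInnerA]
    have : ¬ (ant1 = antenna1 ∧ s ≤ antenna2 ∧ antenna2 < n) := by
      rintro ⟨-, h1, h2⟩; omega
    rw [if_neg this]
    congr 1; omega
  | succ k ih =>
    intro s idx hk
    have hsn : s < n := by omega
    rw [PySem.List.pyRange_one_cons hsn]
    simp only [pvInnerA]
    by_cases hmatch : ant1 = antenna1 ∧ s = antenna2
    · rw [if_pos hmatch]
      obtain ⟨hm1, hm2⟩ := hmatch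
      have : ant1 = antenna1 ∧ s ≤ antenna2 ∧ antenna2 < n := ⟨hm1, by omega, by omega⟩
      rw [if_pos this]
      have h2 : antenna2 - s = 0 := by omega
      rw [h2]; simp
    · rw [if_neg hmatch]
      rw [ih (s + 1) (idx + 1) (by omega)]
      by_cases hc : ant1 = antenna1 ∧ s ≤ antenna2 ∧ antenna2 < n
      · have hne : s ≠ antenna2 := fun h => hmatch ⟨hc.1, h⟩
        have hc' : ant1 = antenna1 ∧ s + 1 ≤ antenna2 ∧ antenna2 < n :=
          ⟨hc.1, by omega, hc.2.2⟩
        rw [if_pos hc', if_pos hc]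
        have e : idx + 1 + (antenna2 - (s + 1)) = idx + (antenna2 - s) := by omega
        rw [e]
      · have hc' : ¬ (ant1 = antenna1 ∧ s + 1 ≤ antenna2 ∧ antenna2 < n) := by
          rintro ⟨h1, h2, h3⟩
          apply hc; exact ⟨h1, by
            by_cases hs : s = antenna2
            · exact absurd ⟨h1, hs⟩ hmatch
            · omega, h3⟩
        rw [if_neg hc', if_neg hc]
        congr 1; omega

-- offset still to be added at outer position a1 (B's closed form relativised to a1)
-- E a1 = (full B value) - (pairs counted before a1)
theorem pvOuterA_spec (antenna1 antenna2 n : Int) :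
    ∀ (k : ℕ) (a1 idx : Int), (n - a1).toNat = k → 0 ≤ a1 →
    pvOuterA antenna1 antenna2 n (PySem.List.pyRange a1 n 1) idx =
      (if a1 ≤ antenna1 ∧ antenna1 ≤ antenna2 ∧ antenna2 < n then
         some (idx + (antenna1 * n - (antenna1 * (antenna1 - 1)) / 2 + (antenna2 - antenna1)
                      - (a1 * n - (a1 * (a1 - 1)) / 2)))
       else none) := by
  intro k
  induction k with
  | zero =>
    intro a1 idx hk ha
    have hna : n ≤ a1 := by omega
    rw [PySem.List.pyRange_one_eq_nil hna]
    simp only [pvOuterA]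
    have : ¬ (a1 ≤ antenna1 ∧ antenna1 ≤ antenna2 ∧ antenna2 < n) := by
      rintro ⟨h1, h2, h3⟩; omega
    rw [if_neg this]
  | succ k ih =>
    intro a1 idx hk ha
    have han : a1 < n := by omega
    rw [PySem.List.pyRange_one_cons han]
    simp only [pvOuterA]
    rw [pvInnerA_spec antenna1 antenna2 a1 n (n - a1).toNat a1 idx rfl]
    by_cases hm : a1 = antenna1 ∧ a1 ≤ antenna2 ∧ antenna2 < n
    · rw [if_pos hm]
      dsimp only
      have hcond : a1 ≤ antenna1 ∧ antenna1 ≤ antenna2 ∧ antenna2 < n :=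
        ⟨le_of_eq hm.1, hm.1 ▸ hm.2.1, hm.2.2⟩
      rw [if_pos hcond]
      obtain ⟨h1, -, -⟩ := hm
      subst h1
      congr 1
      generalize a1 * (a1 - 1) / 2 = q
      generalize a1 * n = P
      omega
    · rw [if_neg hm]
      dsimp only
      rw [ih (a1 + 1) (idx + max (n - a1) 0) (by omega) (by omega)]
      by_cases hc : a1 ≤ antenna1 ∧ antenna1 ≤ antenna2 ∧ antenna2 < n
      · have ha1ne : a1 ≠ antenna1 := by
          intro h; exact hm ⟨h, by omega, hc.2.2⟩
        have hc' : a1 + 1 ≤ antenna1 ∧ antenna1 ≤ antenna2 ∧ antenna2 < n :=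
          ⟨by omega, hc.2.1, hc.2.2⟩
        rw [if_pos hc', if_pos hc]
        congr 1
        have hmx : max (n - a1) 0 = n - a1 := by omega
        rw [hmx]
        have e1 : (a1 + 1) * ((a1 + 1) - 1) = a1 * (a1 - 1) + 2 * a1 := by ring
        have e2 : ((a1 + 1) * ((a1 + 1) - 1)) / 2 = (a1 * (a1 - 1)) / 2 + a1 := by
          rw [e1]
          generalize a1 * (a1 - 1) = x
          omega
        have e3 : (a1 + 1) * n = a1 * n + n := by ring
        rw [e2, e3]
        generalize antenna1 * (antenna1 - 1) / 2 = q
        generalize a1 * (a1 - 1) / 2 = r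
        generalize antenna1 * n = A
        generalize a1 * n = P
        omega
      · have hc' : ¬ (a1 + 1 ≤ antenna1 ∧ antenna1 ≤ antenna2 ∧ antenna2 < n) := by
          rintro ⟨h1, h2, h3⟩; exact hc ⟨by omega, h2, h3⟩
        rw [if_neg hc', if_neg hc]

-- ===== VERDICT (by name: the statement is the Claim_ definition above) =====
theorem get_baseline_from_antennas_spec : Claim_equal_get_baseline_from_antennas := by
  intro antenna1 antenna2 num_antennas _
  unfold Spec_get_baseline_from_antennas get_baseline_from_antennas get_baseline_from_antennas_alt
  rw [pvOuterA_spec antenna1 antenna2 num_antennas num_antennas.toNat 0 0 (by omega) le_rfl]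
  by_cases hc : 0 ≤ antenna1 ∧ antenna1 ≤ antenna2 ∧ antenna2 < num_antennas
  · rw [if_pos hc, if_pos hc]
    congr 1
    rw [PySem.Int.floordiv_eq_ediv_of_pos (by norm_num : (0:Int) < 2)]
    ring
  · have hc' : ¬ (0 ≤ antenna1 ∧ antenna1 ≤ antenna2 ∧ antenna2 < num_antennas) := hc
    rw [if_neg hc', if_neg hc]
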